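-- pv_equiv track=rewrite | github.com/eguefif/aoc2024 | python/day7.py | calculate
-- ===== SOURCE A (Python) =====
-- def calculate(value, op, result, index):
--     if index == len(op):
--         return result
--     check = calculate(value, op, result + op[index], index + 1)
--     if check == value:
--         return value
--
--     check = calculate(value, op, result * op[index], index + 1)
--     if check == value:
--         return value
--     return 0
-- ===== SOURCE B (Python) =====
-- def calculate(value, op, result, index):
--     n = len(op)
--     if index == n:
--         return result
--     ops = [op[i] for i in range(index, n)]
--
--     def reach(t, k):
--         # can `t` be produced from `result` using ops[0:k] with + / * ?
--         if k == 0: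
--             return t == result
--         o = ops[k - 1]
--         if reach(t - o, k - 1):
--             return True
--         if o == 0:
--             return t == 0
--         return t % o == 0 and reach(t // o, k - 1)
--
--     return value if reach(value, len(ops)) else 0
-- ===== Notes on version B (the rewrite author's own statement) =====
-- stated objective: faster
-- what changed: A enumerates all 2^n forward +/* evaluations of the operands; B searches backwards from the target, inverting + by subtraction and * by exact division, so the multiply branch is pruned whenever the divisor does not divide the current target.
import Mathlib
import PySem

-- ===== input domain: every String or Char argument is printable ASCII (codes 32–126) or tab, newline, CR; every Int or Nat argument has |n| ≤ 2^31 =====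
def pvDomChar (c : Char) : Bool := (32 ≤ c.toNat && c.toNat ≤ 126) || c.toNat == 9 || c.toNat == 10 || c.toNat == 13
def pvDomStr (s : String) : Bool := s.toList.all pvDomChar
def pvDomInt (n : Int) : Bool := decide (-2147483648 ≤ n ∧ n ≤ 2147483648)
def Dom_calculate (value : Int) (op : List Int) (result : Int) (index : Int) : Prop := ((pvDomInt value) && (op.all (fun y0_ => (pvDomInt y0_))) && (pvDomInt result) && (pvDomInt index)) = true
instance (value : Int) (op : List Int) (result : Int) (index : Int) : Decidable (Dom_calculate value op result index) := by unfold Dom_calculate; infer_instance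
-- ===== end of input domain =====

set_option maxRecDepth 8000


-- B replaces A's forward try-all-2^n-expressions recursion by a backward search from the
-- target that inverts + by subtraction and * by exact division (divisibility prunes the branch).

-- termination helper for the port of A (cited in its decreasing_by)
theorem pvGetSome_lt {α : Type} {op : List α} {i : Int} {o : α}
    (h : PySem.List.pyGet? op i = some o) : i < (op.length : Int) := by
  by_contra hlt
  push_neg at hlt
  have hn : PySem.List.pyGet? op i = none := by
    rw [PySem.List.pyGet?_eq_none_iff]
    intro hr
    simp [PySem.Raise.InRange] at hr
    omega
  rw [hn] at h
  exact absurd h (by simp)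

-- ===== PORT A =====
def calculate (value : Int) (op : List Int) (result : Int) (index : Int) : Int :=
  if index = (op.length : Int) then result
  else
    match h : PySem.List.pyGet? op index with
    | none => 0   -- Python raises IndexError here; excluded by Pre_calculate
    | some o =>
      let check := calculate value op (result + o) (index + 1)
      if check = value then value
      else
        let check2 := calculate value op (result * o) (index + 1)
        if check2 = value then value else 0
termination_by ((op.length : Int) - index).toNat
decreasing_by
  all_goals have := pvGetSome_lt h; omega

-- ===== PORT B =====
-- reach(t, k) of Source B: can t be produced from `result` using ops[0:k] with + / * ?
def pvReach (result : Int) (ops : List Int) : Int → Nat → Bool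
  | t, 0 => t == result
  | t, (k+1) =>
    let o := ops.getD k 0
    if pvReach result ops (t - o) k then true
    else if o = 0 then t == 0
    else (PySem.Int.mod t o == 0) && pvReach result ops (PySem.Int.floordiv t o) k

def calculate_alt (value : Int) (op : List Int) (result : Int) (index : Int) : Int :=
  let n : Int := op.length
  if index = n then result
  else
    let ops := (PySem.List.pyRange index n 1).map (fun i => (PySem.List.pyGet? op i).getD 0)
    if pvReach result ops value ops.length then value else 0

-- ===== PRECONDITION & SPEC =====
-- Pre_ excludes exactly the inputs where Python A raises IndexError (index past either end).
def Pre_calculate (value : Int) (op : List Int) (result : Int) (index : Int) : Prop :=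
  -(op.length : Int) ≤ index ∧ index ≤ (op.length : Int)
instance (value : Int) (op : List Int) (result : Int) (index : Int) : Decidable (Pre_calculate value op result index) := by unfold Pre_calculate; infer_instance

def pvWitness_calculate : Int × List Int × Int × Int := (6, [2, 3], 0, 0)

def Spec_calculate (value : Int) (op : List Int) (result : Int) (index : Int) (out : Int) : Prop := out = calculate_alt value op result index
instance (value : Int) (op : List Int) (result : Int) (index : Int) (out : Int) : Decidable (Spec_calculate value op result index out) := by unfold Spec_calculate; infer_instance

-- ===== CLAIM (what is proved, stated in full; the proofs are below) =====
def Claim_equal_calculate : Prop := ∀ (value : Int) (op : List Int) (result : Int) (index : Int), Dom_calculate value op result index → Pre_calculate value op result index → Spec_calculate value op result index (calculate value op result index)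

-- ===== LEMMAS AND PROOFS =====

-- forward search: pvHits v r l ↔ some +/*-evaluation of l starting from r equals v
def pvHits (v : Int) : Int → List Int → Bool
  | r, [] => r == v
  | r, o :: rest => pvHits v (r + o) rest || pvHits v (r * o) rest

theorem pvHits_snoc : ∀ (l : List Int) (r v o : Int),
    pvHits v r (l ++ [o]) =
      (pvHits (v - o) r l ||
        (if o = 0 then v == 0
         else (PySem.Int.mod v o == 0) && pvHits (PySem.Int.floordiv v o) r l)) := by
  intro l
  induction l with
  | nil =>
      intro r v o
      by_cases ho : o = 0
      · subst ho
        rw [List.nil_append, if_pos rfl]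
        apply Bool.eq_iff_iff.mpr
        simp only [pvHits, Bool.or_eq_true, beq_iff_eq, mul_zero, add_zero, sub_zero]
        omega
      · simp only [List.nil_append, pvHits, if_neg ho]
        apply Bool.eq_iff_iff.mpr
        simp only [Bool.or_eq_true, Bool.and_eq_true, beq_iff_eq]
        constructor
        · rintro (h | h)
          · left; omega
          · right
            have hdvd : o ∣ v := ⟨r, by rw [← h]; ring⟩
            have hm : PySem.Int.mod v o = 0 := (PySem.Int.mod_eq_zero_iff_dvd v o).mpr hdvd
            refine ⟨hm, ?_⟩
            have hfm := PySem.Int.floordiv_mul_add_mod v o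
            rw [hm] at hfm
            have : PySem.Int.floordiv v o * o = r * o := by linarith
            exact ((mul_left_inj' ho).mp this).symm
        · rintro (h | h)
          · left; omega
          · right
            obtain ⟨hm, hr⟩ := h
            have hfm := PySem.Int.floordiv_mul_add_mod v o
            rw [hm] at hfm
            rw [hr]
            linarith
  | cons x l' ih =>
      intro r v o
      simp only [List.cons_append, pvHits, ih]
      by_cases ho : o = 0
      · simp only [if_pos ho]
        apply Bool.eq_iff_iff.mpr
        simp only [Bool.or_eq_true]
        tauto
      · simp only [if_neg ho]
        apply Bool.eq_iff_iff.mpr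
        simp only [Bool.or_eq_true, Bool.and_eq_true]
        tauto

-- pvReach over the first k operands is the forward search over ops.take k
theorem pvReach_take (result : Int) (ops : List Int) :
    ∀ (k : Nat), k ≤ ops.length → ∀ (t : Int),
      pvReach result ops t k = pvHits t result (ops.take k) := by
  intro k
  induction k with
  | zero =>
      intro _ t
      simp only [pvReach, List.take_zero, pvHits]
      apply Bool.eq_iff_iff.mpr
      simp only [beq_iff_eq]
      omega
  | succ k ih =>
      intro hk t
      have hklt : k < ops.length := by omega
      have htake : ops.take (k + 1) = ops.take k ++ [ops[k]] := by
        rw [List.take_succ]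
        simp [List.getElem?_eq_getElem hklt]
      have hgetD : ops.getD k 0 = ops[k] := by
        simp [List.getD, List.getElem?_eq_getElem hklt]
      rw [htake, pvHits_snoc]
      simp only [pvReach, hgetD]
      by_cases hb : pvReach result ops (t - ops[k]) k
      · rw [if_pos hb]
        rw [ih (by omega)] at hb
        simp [hb]
      · rw [if_neg hb]
        rw [ih (by omega)] at hb
        rw [Bool.not_eq_true] at hb
        rw [hb, Bool.false_or]
        by_cases ho : ops[k] = 0
        · simp [ho]
        · simp only [if_neg ho]
          congr 1
          exact ih (by omega) _

-- characterisation of A on in-range starting indices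
theorem calculate_eq_hits (value : Int) (op : List Int) :
    ∀ (fuel : Nat) (index : Int), -(op.length : Int) ≤ index → index < (op.length : Int) →
      fuel = ((op.length : Int) - index).toNat →
      ∀ (r : Int),
        calculate value op r index =
          (if pvHits value r ((PySem.List.pyRange index (op.length : Int) 1).map
              (fun i => (PySem.List.pyGet? op i).getD 0)) then value else 0) := by
  intro fuel
  induction fuel with
  | zero => intro index h1 h2 hf; omega
  | succ fuel ih =>
      intro index h1 h2 hf r
      -- the operand at `index` exists
      have hir : PySem.Raise.InRange op.length index := by
        simp [PySem.Raise.InRange]; omega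
      obtain ⟨o, ho⟩ : ∃ o, PySem.List.pyGet? op index = some o := by
        cases hg : PySem.List.pyGet? op index with
        | none => exact absurd hir ((PySem.List.pyGet?_eq_none_iff op index).mp hg)
        | some o => exact ⟨o, rfl⟩
      have hrange : PySem.List.pyRange index (op.length : Int) 1
          = index :: PySem.List.pyRange (index + 1) (op.length : Int) 1 :=
        PySem.List.pyRange_one_cons h2
      have hA : calculate value op r index =
          (let check := calculate value op (r + o) (index + 1)
           if check = value then value
           else
             let check2 := calculate value op (r * o) (index + 1)
             if check2 = value then value else 0) := by
        rw [calculate]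
        rw [if_neg (by omega), ho]
      rw [hA, hrange]
      simp only [List.map_cons, ho, Option.getD_some, pvHits]
      by_cases hend : index + 1 = (op.length : Int)
      · -- last operand: the recursive calls hit the base case of A
        have hnil : PySem.List.pyRange (index + 1) (op.length : Int) 1 = [] :=
          PySem.List.pyRange_one_eq_nil (by omega)
        have hbase : ∀ s : Int, calculate value op s (index + 1) = s := by
          intro s; rw [calculate, if_pos hend]
        rw [hnil]
        simp only [List.map_nil, hbase, pvHits]
        by_cases c1 : r + o = value
        · simp [c1]
        · by_cases c2 : r * o = value
          · simp [c1, c2]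
          · simp [c1, c2]
      · -- still operands left: apply the induction hypothesis to both recursive calls
        have ih1 := ih (index + 1) (by omega) (by omega) (by omega) (r + o)
        have ih2 := ih (index + 1) (by omega) (by omega) (by omega) (r * o)
        rw [ih1, ih2]
        by_cases hv : value = 0
        · subst hv
          by_cases c1 : pvHits 0 (r + o) ((PySem.List.pyRange (index + 1) (op.length : Int) 1).map
              (fun i => (PySem.List.pyGet? op i).getD 0)) <;>
            by_cases c2 : pvHits 0 (r * o) ((PySem.List.pyRange (index + 1) (op.length : Int) 1).map
              (fun i => (PySem.List.pyGet? op i).getD 0)) <;>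
            simp [c1, c2]
        · by_cases c1 : pvHits value (r + o) ((PySem.List.pyRange (index + 1) (op.length : Int) 1).map
              (fun i => (PySem.List.pyGet? op i).getD 0)) <;>
            by_cases c2 : pvHits value (r * o) ((PySem.List.pyRange (index + 1) (op.length : Int) 1).map
              (fun i => (PySem.List.pyGet? op i).getD 0)) <;>
            simp [c1, c2, Ne.symm hv]

-- ===== VERDICT (by name: the statement is the Claim_ definition above) =====
theorem calculate_spec : Claim_equal_calculate := by
  unfold Claim_equal_calculate
  intro value op result index _ hpre
  obtain ⟨h1, h2⟩ := hpre
  unfold Spec_calculate calculate_alt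
  by_cases hi : index = (op.length : Int)
  · simp only [if_pos hi]
    rw [calculate, if_pos hi]
  · simp only [if_neg hi]
    have hlt : index < (op.length : Int) := lt_of_le_of_ne h2 hi
    rw [calculate_eq_hits value op ((op.length : Int) - index).toNat index h1 hlt rfl result]
    set ops := (PySem.List.pyRange index (op.length : Int) 1).map
        (fun i => (PySem.List.pyGet? op i).getD 0) with hops
    rw [pvReach_take result ops ops.length le_rfl value, List.take_length]
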